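-- pv_equiv track=rewrite | github.com/mikolajpienko/ReminderBot | main.py | rowToHour
-- ===== SOURCE A (Python) =====
-- def rowToHour(row):
--     hour = 8
--     min = 0
--     for i in range(1, row):
--         min+=15
--         if(min >= 60):
--             min = 0
--             hour+=1
--     if(min == 0):
--         return str("{}.00".format(hour))
--     else:
--         return str("{}.{}".format(hour, min))
-- ===== SOURCE B (Python) =====
-- def rowToHour(row):
--     n = max(row - 1, 0)
--     hour = 8 + n // 4
--     m = 15 * (n % 4)
--     if m == 0:
--         return "{}.00".format(hour)
--     else:
--         return "{}.{}".format(hour, m)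
-- ===== Notes on version B (the rewrite author's own statement) =====
-- stated objective: faster
-- what changed: Replaced A's linear loop, which accumulates a quarter-hour per row and carries into the hour, with constant-time quotient/remainder arithmetic on the row index.
import Mathlib
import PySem

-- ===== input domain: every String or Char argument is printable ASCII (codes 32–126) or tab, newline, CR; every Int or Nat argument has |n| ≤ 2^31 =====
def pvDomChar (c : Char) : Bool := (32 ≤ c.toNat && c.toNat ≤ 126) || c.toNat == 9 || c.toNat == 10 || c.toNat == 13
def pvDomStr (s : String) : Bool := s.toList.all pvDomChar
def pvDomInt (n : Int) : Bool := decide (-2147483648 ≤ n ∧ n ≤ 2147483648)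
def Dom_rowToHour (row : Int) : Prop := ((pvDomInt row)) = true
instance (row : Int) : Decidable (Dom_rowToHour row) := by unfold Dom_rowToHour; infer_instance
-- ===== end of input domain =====

-- B replaces A's linear quarter-hour accumulation loop by constant-time quotient/remainder arithmetic (objective: faster).

-- ===== PORT A =====
def rowToHour (row : Int) : String :=
  let st := (PySem.List.pyRange 1 row 1).foldl
    (fun (s : Int × Int) _ =>
      let m := s.2 + 15
      if m ≥ 60 then (s.1 + 1, 0) else (s.1, m)) (8, 0)
  if st.2 = 0 then PySem.Int.toStr st.1 ++ ".00"
  else PySem.Int.toStr st.1 ++ "." ++ PySem.Int.toStr st.2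

-- ===== PORT B =====
def rowToHour_alt (row : Int) : String :=
  let n := max (row - 1) 0
  let hour := 8 + PySem.Int.floordiv n 4
  let m := 15 * (PySem.Int.mod n 4)
  if m = 0 then PySem.Int.toStr hour ++ ".00"
  else PySem.Int.toStr hour ++ "." ++ PySem.Int.toStr m

-- ===== PRECONDITION & SPEC =====
def Spec_rowToHour (row : Int) (out : String) : Prop := out = rowToHour_alt row
instance (row : Int) (out : String) : Decidable (Spec_rowToHour row out) := by unfold Spec_rowToHour; infer_instance

-- ===== CLAIM (what is proved, stated in full; the proofs are below) =====
def Claim_equal_rowToHour : Prop := ∀ (row : Int), Dom_rowToHour row → Spec_rowToHour row (rowToHour row)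

-- ===== LEMMAS AND PROOFS =====

-- A's loop body ignores the loop variable; after n more iterations from state
-- (8 + k/4, 15*(k%4)) the state is (8 + (k+n)/4, 15*((k+n)%4)).
theorem rowToHour_fold_inv (l : List Int) (k : Nat) :
    l.foldl
      (fun (s : Int × Int) _ =>
        let m := s.2 + 15
        if m ≥ 60 then (s.1 + 1, 0) else (s.1, m))
      ((8 + (k / 4 : Nat) : Int), ((15 * (k % 4) : Nat) : Int))
    = ((8 + ((k + l.length) / 4 : Nat) : Int), ((15 * ((k + l.length) % 4) : Nat) : Int)) := by
  induction l generalizing k with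
  | nil => simp
  | cons x xs ih =>
    simp only [List.foldl_cons]
    have hstep :
        (if ((15 * (k % 4) : Nat) : Int) + 15 ≥ 60
          then ((8 + (k / 4 : Nat) : Int) + 1, (0 : Int))
          else ((8 + (k / 4 : Nat) : Int), ((15 * (k % 4) : Nat) : Int) + 15))
        = ((8 + ((k + 1) / 4 : Nat) : Int), ((15 * ((k + 1) % 4) : Nat) : Int)) := by
      by_cases h : k % 4 = 3
      · have h60 : ((15 * (k % 4) : Nat) : Int) + 15 ≥ 60 := by rw [h]; norm_num
        rw [if_pos h60]
        simp only [Prod.mk.injEq]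
        refine ⟨?_, ?_⟩ <;> omega
      · have hlt : ¬ (((15 * (k % 4) : Nat) : Int) + 15 ≥ 60) := by
          have : k % 4 < 3 := by omega
          push_cast; omega
        rw [if_neg hlt]
        simp only [Prod.mk.injEq]
        refine ⟨?_, ?_⟩ <;> omega
    rw [hstep, ih (k + 1)]
    simp only [List.length_cons, Prod.mk.injEq]
    refine ⟨?_, ?_⟩ <;> omega

theorem rowToHour_spec_aux (row : Int) : rowToHour row = rowToHour_alt row := by
  have hlen : (PySem.List.pyRange 1 row 1).length = (row - 1).toNat :=
    PySem.List.length_pyRange_one 1 row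
  have hfold := rowToHour_fold_inv (PySem.List.pyRange 1 row 1) 0
  simp only [Nat.zero_div, Nat.zero_mod, Nat.zero_add, hlen, Nat.cast_zero, add_zero,
    mul_zero] at hfold
  have hmax : max (row - 1) 0 = (((row - 1).toNat : Nat) : Int) := by omega
  have hdiv : PySem.Int.floordiv (((row - 1).toNat : Nat) : Int) 4 = (((row - 1).toNat / 4 : Nat) : Int) := by
    rw [PySem.Int.floordiv_eq_ediv_of_pos (by norm_num)]
    omega
  have hmod : PySem.Int.mod (((row - 1).toNat : Nat) : Int) 4 = (((row - 1).toNat % 4 : Nat) : Int) := by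
    rw [PySem.Int.mod_eq_emod_of_pos (by norm_num)]
    omega
  simp only [rowToHour, rowToHour_alt, hfold, hmax, hdiv, hmod]
  push_cast
  rfl

-- ===== VERDICT (by name: the statement is the Claim_ definition above) =====
theorem rowToHour_spec : Claim_equal_rowToHour := by
  intro row _
  unfold Spec_rowToHour
  exact rowToHour_spec_aux row
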